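-- pv_equiv track=rewrite | github.com/MamdouhAlShamy/ProjectEuler | 1_MultiplesOf3And5Under1000.py | getMultiplesOf
-- ===== SOURCE A (Python) =====
-- def isNumberMultipleOfBase(base, number):
-- 	if number%base == 0:
-- 		return True
-- 	else:
-- 		return False
--
-- def getMultiplesOf(base1,base2, stoppingNumber):
-- 	sum = 0
-- 	for number in range(1,stoppingNumber):
-- 		if isNumberMultipleOfBase(base1, number):
-- 			# print ("Number " + str(i) + " is multiple of " + str(base) )
-- 			sum += number
-- 		elif isNumberMultipleOfBase(base2, number):
-- 			sum += number
-- 	return sum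
-- ===== SOURCE B (Python) =====
-- def getMultiplesOf(base1, base2, stoppingNumber):
--     n = stoppingNumber - 1
--     if n < 1:
--         return 0
--     d1, d2 = abs(base1), abs(base2)
--     a, b = d1, d2
--     while b:
--         a, b = b, a % b
--     l = d1 * d2 // a
--     return _triMultiples(d1, n) + _triMultiples(d2, n) - _triMultiples(l, n)
--
-- def _triMultiples(d, n):
--     t = n // d
--     return d * t * (t + 1) // 2
-- ===== Notes on version B (the rewrite author's own statement) =====
-- stated objective: faster
-- what changed: Replaces the O(n) loop over range(1, stoppingNumber) with O(1) closed-form arithmetic-series sums and inclusion-exclusion over lcm(|base1|,|base2|) computed by Euclid's algorithm.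
-- outside the precondition, e.g. on getMultiplesOf(1, 0, 5): A returns 10, B raises ZeroDivisionError; on getMultiplesOf(0, 3, 1): A returns 0, B returns 0
import Mathlib
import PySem

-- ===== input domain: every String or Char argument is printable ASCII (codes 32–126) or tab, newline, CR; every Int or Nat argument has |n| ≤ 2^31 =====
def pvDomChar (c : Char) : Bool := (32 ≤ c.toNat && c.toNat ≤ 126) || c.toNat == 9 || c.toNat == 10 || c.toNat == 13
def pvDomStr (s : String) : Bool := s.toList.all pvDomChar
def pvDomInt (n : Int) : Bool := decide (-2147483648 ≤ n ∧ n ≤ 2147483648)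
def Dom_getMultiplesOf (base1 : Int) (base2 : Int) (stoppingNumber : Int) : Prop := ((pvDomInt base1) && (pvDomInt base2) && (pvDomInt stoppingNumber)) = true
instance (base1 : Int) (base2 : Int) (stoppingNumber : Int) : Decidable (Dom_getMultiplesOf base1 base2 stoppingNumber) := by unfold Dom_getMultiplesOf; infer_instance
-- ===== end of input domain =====

-- B replaces A's loop over range(1, stoppingNumber) by closed-form arithmetic-series sums with inclusion-exclusion over the lcm (objective: faster).


-- ===== PORT A =====
def isNumberMultipleOfBase (base : Int) (number : Int) : Bool :=
  if PySem.Int.mod number base == 0 then true else false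

def getMultiplesOf (base1 : Int) (base2 : Int) (stoppingNumber : Int) : Int :=
  (PySem.List.pyRange 1 stoppingNumber 1).foldl (fun sum number =>
    if isNumberMultipleOfBase base1 number then sum + number
    else if isNumberMultipleOfBase base2 number then sum + number
    else sum) 0

-- ===== PORT B =====
-- termination fact for the Euclid loop in B (cited by pyGcdLoop's decreasing_by)
theorem pvModNatAbsLt (a b : Int) (hb : b ≠ 0) : (PySem.Int.mod a b).natAbs < b.natAbs := by
  rcases lt_or_gt_of_ne hb with h | h
  · have := PySem.Int.mod_neg_bounds a h; omega
  · have h1 := PySem.Int.mod_nonneg a h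
    have h2 := PySem.Int.mod_lt a h
    omega

-- B's 'while b: a, b = b, a % b'
def pyGcdLoop (a b : Int) : Int :=
  if _hb : b = 0 then a else pyGcdLoop b (PySem.Int.mod a b)
termination_by b.natAbs
decreasing_by exact pvModNatAbsLt a b _hb

-- B's helper _triMultiples(d, n)
def triMultiples (d n : Int) : Int :=
  let t := PySem.Int.floordiv n d
  PySem.Int.floordiv (d * t * (t + 1)) 2

def getMultiplesOf_alt (base1 : Int) (base2 : Int) (stoppingNumber : Int) : Int :=
  let n := stoppingNumber - 1
  if n < 1 then 0
  else
    let d1 := |base1|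
    let d2 := |base2|
    let g := pyGcdLoop d1 d2
    let l := PySem.Int.floordiv (d1 * d2) g
    triMultiples d1 n + triMultiples d2 n - triMultiples l n

-- ===== PRECONDITION & SPEC =====
-- Pre_ excludes base1 = 0 or base2 = 0: there A raises ZeroDivisionError except on degenerate escapes
-- (an empty loop, or base1 = ±1 shadowing base2, where A returns) while B's lcm computation divides by zero.
def Pre_getMultiplesOf (base1 : Int) (base2 : Int) (stoppingNumber : Int) : Prop :=
  base1 ≠ 0 ∧ base2 ≠ 0
instance (base1 : Int) (base2 : Int) (stoppingNumber : Int) : Decidable (Pre_getMultiplesOf base1 base2 stoppingNumber) := by unfold Pre_getMultiplesOf; infer_instance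

def pvWitness_getMultiplesOf : Int × Int × Int := (3, 5, 10)

def Spec_getMultiplesOf (base1 : Int) (base2 : Int) (stoppingNumber : Int) (out : Int) : Prop := out = getMultiplesOf_alt base1 base2 stoppingNumber
instance (base1 : Int) (base2 : Int) (stoppingNumber : Int) (out : Int) : Decidable (Spec_getMultiplesOf base1 base2 stoppingNumber out) := by unfold Spec_getMultiplesOf; infer_instance

-- ===== CLAIM (what is proved, stated in full; the proofs are below) =====
def Claim_equal_getMultiplesOf : Prop := ∀ (base1 : Int) (base2 : Int) (stoppingNumber : Int), Dom_getMultiplesOf base1 base2 stoppingNumber → Pre_getMultiplesOf base1 base2 stoppingNumber → Spec_getMultiplesOf base1 base2 stoppingNumber (getMultiplesOf base1 base2 stoppingNumber)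

-- ===== LEMMAS AND PROOFS =====

theorem pyGcdLoop_eq_gcd (a b : Int) (ha : 0 ≤ a) (hb : 0 ≤ b) :
    pyGcdLoop a b = (Int.gcd a b : Int) := by
  induction a, b using pyGcdLoop.induct with
  | case1 a =>
    rw [pyGcdLoop]
    simp [Int.gcd, Int.natAbs_of_nonneg ha]
  | case2 a b h ih =>
    have hbpos : 0 < b := lt_of_le_of_ne hb (Ne.symm h)
    rw [pyGcdLoop]
    simp only [h, dite_false]
    rw [ih hb (PySem.Int.mod_nonneg a hbpos), PySem.Int.mod_eq_emod_of_pos hbpos]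
    congr 1
    rw [Int.gcd, Int.gcd, Int.natAbs_emod_of_nonneg ha, Nat.gcd_comm, ← Nat.gcd_rec, Nat.gcd_comm]

theorem tri_zero (d : Int) (hd : 0 < d) : triMultiples d 0 = 0 := by
  simp [triMultiples, PySem.Int.floordiv_eq_ediv_of_pos hd]

theorem tri_step (d : Int) (hd : 0 < d) (n : Int) :
    triMultiples d (n + 1) = triMultiples d n + (if d ∣ (n + 1) then n + 1 else 0) := by
  simp only [triMultiples, PySem.Int.floordiv_eq_ediv_of_pos hd,
             PySem.Int.floordiv_eq_ediv_of_pos (show (0:Int) < 2 by norm_num)]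
  set t := n / d with ht
  set t' := (n + 1) / d with ht'
  have hr : d * t + n % d = n := Int.mul_ediv_add_emod n d
  have hr0 : 0 ≤ n % d := Int.emod_nonneg n (by omega)
  have hr1 : n % d < d := Int.emod_lt_of_pos n hd
  set r := n % d with hrdef
  have hsplit : t' = (r + 1) / d + t := by
    rw [ht', show n + 1 = (r + 1) + d * t by omega, Int.add_mul_ediv_left _ _ (by omega : d ≠ 0)]
  obtain ⟨k, hk⟩ := Int.even_mul_succ_self t
  obtain ⟨k', hk'⟩ := Int.even_mul_succ_self t'
  have e1 : d * t * (t + 1) = 2 * (d * k) := by rw [mul_assoc, hk]; ring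
  have e2 : d * t' * (t' + 1) = 2 * (d * k') := by rw [mul_assoc, hk']; ring
  rw [e1, e2, Int.mul_ediv_cancel_left _ (by norm_num : (2:Int) ≠ 0),
      Int.mul_ediv_cancel_left _ (by norm_num : (2:Int) ≠ 0)]
  by_cases hdvd : d ∣ (n + 1)
  · obtain ⟨c, hc⟩ := hdvd
    have hrd : r + 1 = d := by
      have hdr : d ∣ r + 1 := ⟨c - t, by linear_combination hc + hr⟩
      have := Int.le_of_dvd (by omega) hdr
      omega
    have htt : t' = t + 1 := by
      rw [hsplit, hrd, Int.ediv_self (by omega)]; ring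
    have hk'2 : (t + 1) * ((t + 1) + 1) = k' + k' := by rw [← htt]; exact hk'
    have h2 : k' + k' = k + k + 2 * (t + 1) := by linear_combination hk - hk'2
    have hkk : k' = k + (t + 1) := by omega
    rw [if_pos ⟨c, hc⟩]
    have hdt : d * (t + 1) = n + 1 := by linear_combination hr - hrd
    linear_combination d * hkk + hdt
  · have hrd : r + 1 < d := by
      rcases lt_or_eq_of_le (show r + 1 ≤ d by omega) with h | h
      · exact h
      · exact absurd ⟨t + 1, by linear_combination h - hr⟩ hdvd
    have htt : t' = t := by
      rw [hsplit, Int.ediv_eq_zero_of_lt (by omega) hrd]; ring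
    have hk'2 : t * (t + 1) = k' + k' := by rw [← htt]; exact hk'
    have hkk : k' = k := by
      have : k + k = k' + k' := by linear_combination hk'2 - hk
      omega
    rw [if_neg hdvd, hkk]; ring

theorem sum_key (d1 d2 L : Int) (hd1 : 0 < d1) (hd2 : 0 < d2) (hL : 0 < L)
    (hiff : ∀ k : Int, L ∣ k ↔ d1 ∣ k ∧ d2 ∣ k) (m : Nat) :
    (PySem.List.pyRange 1 ((m : Int) + 1) 1).foldl (fun s k =>
        if d1 ∣ k then s + k else if d2 ∣ k then s + k else s) 0
      = triMultiples d1 m + triMultiples d2 m - triMultiples L m := by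
  induction m with
  | zero =>
    rw [show ((0 : Nat) : Int) + 1 = 1 by norm_num, PySem.List.pyRange_one_eq_nil (by norm_num)]
    simp [tri_zero _ hd1, tri_zero _ hd2, tri_zero _ hL]
  | succ m ih =>
    rw [show (((m + 1 : Nat)) : Int) + 1 = ((m : Int) + 1) + 1 by push_cast; ring,
        PySem.List.pyRange_one_succ_right (by omega : (1:Int) ≤ (m : Int) + 1),
        List.foldl_append]
    simp only [List.foldl_cons, List.foldl_nil]
    rw [ih, show (((m + 1 : Nat)) : Int) = (m : Int) + 1 by push_cast; ring,
        tri_step d1 hd1 (m : Int), tri_step d2 hd2 (m : Int), tri_step L hL (m : Int)]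
    by_cases h1 : d1 ∣ ((m : Int) + 1) <;> by_cases h2 : d2 ∣ ((m : Int) + 1)
    · have hl : L ∣ ((m : Int) + 1) := (hiff _).mpr ⟨h1, h2⟩
      simp only [if_pos h1, if_pos h2, if_pos hl]; ring
    · have hl : ¬ L ∣ ((m : Int) + 1) := fun hl => h2 ((hiff _).mp hl).2
      simp only [if_pos h1, if_neg h2, if_neg hl]; ring
    · have hl : ¬ L ∣ ((m : Int) + 1) := fun hl => h1 ((hiff _).mp hl).1
      simp only [if_neg h1, if_pos h2, if_neg hl]; ring
    · have hl : ¬ L ∣ ((m : Int) + 1) := fun hl => h1 ((hiff _).mp hl).1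
      simp only [if_neg h1, if_neg h2, if_neg hl]; ring

-- ===== VERDICT (by name: the statement is the Claim_ definition above) =====
theorem getMultiplesOf_spec : Claim_equal_getMultiplesOf := by
  intro b1 b2 stop _hdom hpre
  obtain ⟨h1, h2⟩ := hpre
  unfold Spec_getMultiplesOf getMultiplesOf getMultiplesOf_alt
  have hfun : (fun (sum number : Int) =>
      if isNumberMultipleOfBase b1 number then sum + number
      else if isNumberMultipleOfBase b2 number then sum + number
      else sum)
      = (fun s k => if |b1| ∣ k then s + k else if |b2| ∣ k then s + k else s) := by
    funext s k
    simp [isNumberMultipleOfBase, PySem.Int.mod_eq_zero_iff_dvd, abs_dvd]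
  rw [hfun]
  by_cases hs : stop ≤ 1
  · rw [PySem.List.pyRange_one_eq_nil hs, if_pos (by omega : stop - 1 < 1)]
    rfl
  · rw [if_neg (by omega : ¬ stop - 1 < 1)]
    have hb1 : |b1| = (b1.natAbs : Int) := Int.abs_eq_natAbs b1
    have hb2 : |b2| = (b2.natAbs : Int) := Int.abs_eq_natAbs b2
    have hN1 : 0 < b1.natAbs := Int.natAbs_pos.mpr h1
    have hN2 : 0 < b2.natAbs := Int.natAbs_pos.mpr h2
    have hg : pyGcdLoop (b1.natAbs : Int) (b2.natAbs : Int)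
        = ((Nat.gcd b1.natAbs b2.natAbs : Nat) : Int) := by
      rw [pyGcdLoop_eq_gcd _ _ (by positivity) (by positivity)]
      simp [Int.gcd, Int.natAbs_abs]
    have hl : PySem.Int.floordiv ((b1.natAbs : Int) * (b2.natAbs : Int))
          ((Nat.gcd b1.natAbs b2.natAbs : Nat) : Int)
        = ((Nat.lcm b1.natAbs b2.natAbs : Nat) : Int) := by
      rw [show ((b1.natAbs : Int) * (b2.natAbs : Int))
            = ((b1.natAbs * b2.natAbs : Nat) : Int) by push_cast; ring,
          PySem.Int.floordiv_natCast, Nat.lcm]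
    have hilcm : ((Int.lcm (b1.natAbs : Int) (b2.natAbs : Int) : Nat) : Int)
        = ((Nat.lcm b1.natAbs b2.natAbs : Nat) : Int) := by simp [Int.lcm, Int.natAbs_abs]
    have hiff : ∀ k : Int, ((Nat.lcm b1.natAbs b2.natAbs : Nat) : Int) ∣ k
        ↔ ((b1.natAbs : Int) ∣ k ∧ (b2.natAbs : Int) ∣ k) := by
      intro k
      constructor
      · intro hlk
        refine ⟨dvd_trans ?_ hlk, dvd_trans ?_ hlk⟩
        · rw [← hilcm]; exact Int.dvd_lcm_left _ _
        · rw [← hilcm]; exact Int.dvd_lcm_right _ _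
      · rintro ⟨ha, hb⟩
        rw [← hilcm]; exact Int.coe_lcm_dvd ha hb
    simp only [hb1, hb2, hg, hl]
    obtain ⟨m, hm⟩ : ∃ m : Nat, stop = (m : Int) + 1 := ⟨(stop - 1).toNat, by omega⟩
    subst hm
    rw [show ((m : Int) + 1 - 1) = (m : Int) by ring]
    exact sum_key _ _ _ (by exact_mod_cast hN1) (by exact_mod_cast hN2)
      (by exact_mod_cast Nat.lcm_pos hN1 hN2) hiff m
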